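-- pv_equiv track=rewrite | github.com/newtonsspawn/codewars_challenges | Python/1 kyu/Become Immortal/elderage.py | elder_age
-- ===== SOURCE A (Python) =====
-- def elder_age(m, n, l, t):
--
--     def larger(x, temp=1):
--         while temp < x:
--             temp <<= 1
--         return temp
--
--     def sum_range(lf, r):
--         ans = (lf + r) * (r - lf + 1) // 2
--         return ans
--
--     if m == 0 or n == 0:
--         return 0
--     elif m > n:
--         m, n = n, m
--
--     lm, ln = larger(m), larger(n)
--     if l > ln:
--         return 0
--
--     if lm == ln:
--         tm = (sum_range(1, ln - l - 1) * (m + n - ln) +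
--               elder_age(ln - n, lm - m, l, t)) % t
--         return tm
--     elif lm < ln:
--         lm = ln // 2
--         tmp = sum_range(1, ln - l - 1) * m - (ln - n) * sum_range(
--             max(lm - l, 0), ln - l - 1)
--         if l <= lm:
--             tmp += (lm - l) * (lm - m) * (ln - n) + elder_age(lm - m, ln - n, 0,
--                                                               t)
--         else:
--             tmp += elder_age(lm - m, ln - n, l - lm, t)
--         return tmp % t
-- ===== SOURCE B (Python) =====
-- def elder_age(m, n, l, t):
--     # Iterative block descent with a single deferred modulo: one loop peels one
--     # power-of-two level per iteration, accumulating the exact donation sum via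
--     # triangular numbers; the modulo is taken once at the end.
--     def tri(x):
--         return x * (x + 1) // 2
--
--     total = 0
--     while True:
--         if m == 0 or n == 0:
--             break
--         if m > n:
--             m, n = n, m
--         ln = 1
--         while ln < n:
--             ln *= 2
--         if l > ln:
--             break
--         lm = 1
--         while lm < m:
--             lm *= 2
--         top = tri(ln - l - 1)
--         if lm == ln:
--             total += top * (m + n - ln)
--             m, n = ln - n, lm - m
--         else:
--             half = ln // 2
--             total += top * m - (ln - n) * (top - tri(max(half - l, 0) - 1))
--             if l <= half:
--                 total += (half - l) * (half - m) * (ln - n)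
--                 m, n, l = half - m, ln - n, 0
--             else:
--                 m, n, l = half - m, ln - n, l - half
--     return total % t
-- ===== Notes on version B (the rewrite author's own statement) =====
-- stated objective: simpler
-- what changed: Replaced the quadrant recursion with an interleaved '% t' at every level by a single iterative block-descent loop that keeps (m, n, l) plus an exact running total expressed with triangular numbers and reduces modulo t once at the end.
-- outside the precondition, e.g. on elder_age(0, 5, 0, 0): A returns 0, B raises ZeroDivisionError
import Mathlib
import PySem

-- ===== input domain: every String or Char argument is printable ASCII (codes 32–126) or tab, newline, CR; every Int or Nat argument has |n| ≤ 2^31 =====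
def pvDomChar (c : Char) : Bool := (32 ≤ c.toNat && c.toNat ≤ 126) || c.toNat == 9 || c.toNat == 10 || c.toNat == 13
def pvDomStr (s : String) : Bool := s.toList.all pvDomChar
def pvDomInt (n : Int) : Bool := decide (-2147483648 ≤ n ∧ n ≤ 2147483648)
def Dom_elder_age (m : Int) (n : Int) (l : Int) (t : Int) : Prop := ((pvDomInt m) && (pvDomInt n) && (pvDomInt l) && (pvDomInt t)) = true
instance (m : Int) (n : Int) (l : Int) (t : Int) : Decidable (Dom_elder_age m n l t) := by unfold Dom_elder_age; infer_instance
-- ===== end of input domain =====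

-- B replaces A's quadrant recursion with interleaved `% t` by a single iterative block-descent
-- loop that accumulates the exact sum via triangular numbers and reduces modulo t once at the end.

-- ===== PORT A =====
-- `larger(x, temp=1)`: doubling loop; fuel 64 covers every value reachable from Dom inputs
-- (temp doubles from 1 and the loop stops once temp ≥ x; |x| ≤ 2^31 + 1 throughout the recursion).
def pvLarger (fuel : Nat) (x : Int) (temp : Int) : Int :=
  match fuel with
  | 0 => temp
  | fuel + 1 => if temp < x then pvLarger fuel x (temp * 2) else temp

-- `sum_range(lf, r)`
def pvSumRange (lf r : Int) : Int := PySem.Int.floordiv ((lf + r) * (r - lf + 1)) 2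

-- the recursive body of A; fuel 100 covers every Dom input (recursion depth ≤ 34: the
-- enclosing power of two at least halves at every level after the first two steps).
def elderGoA (fuel : Nat) (m n l t : Int) : Int :=
  match fuel with
  | 0 => 0
  | fuel + 1 =>
    if m = 0 ∨ n = 0 then 0
    else
      -- `elif m > n: m, n = n, m`
      let m' := if m > n then n else m
      let n' := if m > n then m else n
      let lm := pvLarger 64 m' 1
      let ln := pvLarger 64 n' 1
      if l > ln then 0
      else if lm = ln then
        PySem.Int.mod
          (pvSumRange 1 (ln - l - 1) * (m' + n' - ln) + elderGoA fuel (ln - n') (lm - m') l t) t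
      else
        -- `elif lm < ln` (after the swap larger is monotone, so lm ≤ ln and this is the only other case)
        let lm2 := PySem.Int.floordiv ln 2
        let tmp := pvSumRange 1 (ln - l - 1) * m' -
          (ln - n') * pvSumRange (max (lm2 - l) 0) (ln - l - 1)
        let tmp2 :=
          if l ≤ lm2 then
            tmp + (lm2 - l) * (lm2 - m') * (ln - n') + elderGoA fuel (lm2 - m') (ln - n') 0 t
          else
            tmp + elderGoA fuel (lm2 - m') (ln - n') (l - lm2) t
        PySem.Int.mod tmp2 t

def elder_age (m : Int) (n : Int) (l : Int) (t : Int) : Int := elderGoA 100 m n l t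

-- ===== PORT B =====
-- `tri(x)`
def pvTri (x : Int) : Int := PySem.Int.floordiv (x * (x + 1)) 2

-- `while ln < n: ln *= 2` (same fuel guard as A's helper)
def pvGrow (fuel : Nat) (bound ln : Int) : Int :=
  match fuel with
  | 0 => ln
  | fuel + 1 => if ln < bound then pvGrow fuel bound (ln * 2) else ln

-- the `while` loop of B: state (m, n, l) plus the running exact total; fuel guard as in A's port.
def elderGoB (fuel : Nat) (m n l total : Int) : Int :=
  match fuel with
  | 0 => total
  | fuel + 1 =>
    if m = 0 ∨ n = 0 then total
    else
      let m' := if m > n then n else m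
      let n' := if m > n then m else n
      let ln := pvGrow 64 n' 1
      if l > ln then total
      else
        let lm := pvGrow 64 m' 1
        let top := pvTri (ln - l - 1)
        if lm = ln then
          elderGoB fuel (ln - n') (lm - m') l (total + top * (m' + n' - ln))
        else
          let half := PySem.Int.floordiv ln 2
          let total' := total + (top * m' - (ln - n') * (top - pvTri (max (half - l) 0 - 1)))
          if l ≤ half then
            elderGoB fuel (half - m') (ln - n') 0 (total' + (half - l) * (half - m') * (ln - n'))
          else
            elderGoB fuel (half - m') (ln - n') (l - half) total'

def elder_age_alt (m : Int) (n : Int) (l : Int) (t : Int) : Int :=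
  PySem.Int.mod (elderGoB 100 m n l 0) t

-- ===== PRECONDITION & SPEC =====
-- Pre_ excludes t = 0, on which Python A raises ZeroDivisionError at its `% t` (except on the
-- degenerate early returns, where A returns 0 before any modulo while B's final `% 0` raises).
def Pre_elder_age (m : Int) (n : Int) (l : Int) (t : Int) : Prop := t ≠ 0
instance (m : Int) (n : Int) (l : Int) (t : Int) : Decidable (Pre_elder_age m n l t) := by
  unfold Pre_elder_age; infer_instance

def pvWitness_elder_age : Int × Int × Int × Int := (8, 5, 1, 100)

def Spec_elder_age (m : Int) (n : Int) (l : Int) (t : Int) (out : Int) : Prop := out = elder_age_alt m n l t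
instance (m : Int) (n : Int) (l : Int) (t : Int) (out : Int) : Decidable (Spec_elder_age m n l t out) := by unfold Spec_elder_age; infer_instance

-- ===== CLAIM (what is proved, stated in full; the proofs are below) =====
def Claim_equal_elder_age : Prop := ∀ (m : Int) (n : Int) (l : Int) (t : Int), Dom_elder_age m n l t → Pre_elder_age m n l t → Spec_elder_age m n l t (elder_age m n l t)

-- ===== LEMMAS AND PROOFS =====

-- A's doubling helper and B's doubling helper are the same loop.
theorem pvGrow_eq_pvLarger (fuel : Nat) (x temp : Int) :
    pvGrow fuel x temp = pvLarger fuel x temp := by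
  induction fuel generalizing temp with
  | zero => rfl
  | succ k ih => simp only [pvGrow, pvLarger, ih]

theorem fdiv_even_sub (a b : Int) (ha : Even a) (hb : Even b) :
    Int.fdiv (a - b) 2 = Int.fdiv a 2 - Int.fdiv b 2 := by
  obtain ⟨x, hx⟩ := ha
  obtain ⟨y, hy⟩ := hb
  subst hx hy
  have h1 : x + x - (y + y) = 2 * (x - y) := by ring
  have h2 : x + x = 2 * x := by ring
  have h3 : y + y = 2 * y := by ring
  rw [h1, h2, h3, Int.mul_fdiv_cancel_left _ (by norm_num),
    Int.mul_fdiv_cancel_left _ (by norm_num), Int.mul_fdiv_cancel_left _ (by norm_num)]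

-- A's sum_range in terms of B's triangular numbers (exact for ALL integer arguments)
theorem pvSumRange_eq_tri (lf r : Int) : pvSumRange lf r = pvTri r - pvTri (lf - 1) := by
  show Int.fdiv ((lf + r) * (r - lf + 1)) 2 =
    Int.fdiv (r * (r + 1)) 2 - Int.fdiv ((lf - 1) * (lf - 1 + 1)) 2
  have h : (lf + r) * (r - lf + 1) = r * (r + 1) - (lf - 1) * (lf - 1 + 1) := by ring
  rw [h, fdiv_even_sub _ _ (Int.even_mul_succ_self r) (Int.even_mul_succ_self (lf - 1))]

-- absorbing an inner fmod into an outer fmod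
theorem fmod_add_fmod (a b t : Int) : (a + Int.fmod b t).fmod t = (a + b).fmod t := by
  rw [Int.fmod_def b t]
  have h : a + (b - t * (b.fdiv t)) = a + b + t * (-(b.fdiv t)) := by ring
  rw [h, Int.add_mul_fmod_self_left]

-- B's loop only ever adds to its accumulator
theorem elderGoB_acc (fuel : Nat) (m n l total : Int) :
    elderGoB fuel m n l total = total + elderGoB fuel m n l 0 := by
  induction fuel generalizing m n l total with
  | zero => simp [elderGoB]
  | succ k ih =>
    simp only [elderGoB]
    split_ifs
    all_goals try omega
    all_goals (conv_rhs => rw [ih]); rw [ih]; ring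

theorem pvTri_zero : pvTri 0 = 0 := rfl

-- the main induction: A's fueled recursion is B's fueled loop followed by one modulo
theorem elderGo_eq (fuel : Nat) (m n l t : Int) :
    elderGoA fuel m n l t = Int.fmod (elderGoB fuel m n l 0) t := by
  induction fuel generalizing m n l with
  | zero => simp [elderGoA, elderGoB, Int.zero_fmod]
  | succ k ih =>
    simp only [elderGoA, elderGoB, pvGrow_eq_pvLarger,
      show PySem.Int.mod = Int.fmod from rfl]
    split_ifs
    all_goals try simp [Int.zero_fmod]
    all_goals
      rw [ih]
      conv_rhs => rw [elderGoB_acc]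
      rw [fmod_add_fmod]
      congr 1
      simp only [pvSumRange_eq_tri]
      norm_num [pvTri_zero]
      try ring

-- ===== VERDICT (by name: the statement is the Claim_ definition above) =====
theorem elder_age_spec : Claim_equal_elder_age := by
  intro m n l t _ _
  show elder_age m n l t = elder_age_alt m n l t
  exact elderGo_eq 100 m n l t
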